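-- pv_equiv track=rewrite | github.com/daniel-reich/turbo-robot | 8cJnRPxtjNP64k5fq_7.py | dance
-- ===== SOURCE A (Python) =====
-- def dance(lst,parameter):
--   if parameter == 'men':
--     length = len(lst)
--     if length%2 == 0:
--       for i in range(0,length//2):
--         lst[i][1],lst[-(i+1)][1] = lst[-(i+1)][1],lst[i][1]
--       return lst
--     else:
--       for i in range(0,length//2):
--         lst[i][1],lst[-(i+1)][1] = lst[-(i+1)][1],lst[i][1]
--       return lst
--   elif parameter == 'women':
--     length = len(lst)
--     if length%2 == 0:
--       for i in range(0,length//2):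
--         lst[i][0],lst[-(i+1)][0] = lst[-(i+1)][0],lst[i][0]
--       return lst
--     else:
--       for i in range(0,length//2):
--         lst[i][0],lst[-(i+1)][0] = lst[-(i+1)][0],lst[i][0]
--       return lst
-- ===== SOURCE B (Python) =====
-- def dance(lst, parameter):
--     # Same in-place column swap as A (mutates lst), done as build-reverse-writeback.
--     if parameter == 'men':
--         col = 1
--     elif parameter == 'women':
--         col = 0
--     else:
--         return None
--     values = [row[col] for row in lst]
--     values.reverse()
--     for row, v in zip(lst, values):
--         row[col] = v
--     return lst
-- ===== Notes on version B (the rewrite author's own statement) =====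
-- stated objective: simpler
-- what changed: A's duplicated two-ended symmetric swap loops (one per parameter, with a pointless even/odd split) are replaced by mapping the parameter to a column index, extracting the column, reversing it, and writing it back in one pass.
-- outside the precondition, e.g. on dance([['a']], 'men'): A returns [['a']], B raises IndexError
import Mathlib
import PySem

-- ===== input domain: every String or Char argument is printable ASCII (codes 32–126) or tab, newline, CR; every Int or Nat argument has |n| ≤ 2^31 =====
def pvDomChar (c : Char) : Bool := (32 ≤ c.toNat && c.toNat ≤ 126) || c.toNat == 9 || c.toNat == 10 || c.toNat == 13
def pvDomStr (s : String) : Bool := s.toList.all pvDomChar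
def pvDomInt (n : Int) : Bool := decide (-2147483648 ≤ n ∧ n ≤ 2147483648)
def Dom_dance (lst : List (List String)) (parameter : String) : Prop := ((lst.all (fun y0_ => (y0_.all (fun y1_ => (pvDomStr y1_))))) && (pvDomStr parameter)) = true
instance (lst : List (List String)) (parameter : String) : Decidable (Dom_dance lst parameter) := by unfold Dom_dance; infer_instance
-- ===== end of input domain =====

-- B reverses a column in place like A but by build/reverse/writeback; equality proved on the RETURN value (both Pythons mutate lst the same way).

-- ===== PORT A =====
-- one swap step: lst[i][c], lst[-(i+1)][c] = lst[-(i+1)][c], lst[i][c]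
def swapStep (c : Int) (o : Option (List (List String))) (i : Int) : Option (List (List String)) :=
  o.bind fun l => do
    let rowj ← PySem.List.pyGet? l (-(i + 1))
    let a ← PySem.List.pyGet? rowj c
    let rowi ← PySem.List.pyGet? l i
    let b ← PySem.List.pyGet? rowi c
    let rowi' ← PySem.List.pySet? rowi c a
    let l1 ← PySem.List.pySet? l i rowi'
    let rowj2 ← PySem.List.pyGet? l1 (-(i + 1))
    let rowj' ← PySem.List.pySet? rowj2 c b
    PySem.List.pySet? l1 (-(i + 1)) rowj'

-- the loop 'for i in range(0, length//2): …; return lst' (identical in all four of A's branches)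
def swapLoop (lst : List (List String)) (c : Int) : Option (List (List String)) :=
  (PySem.List.pyRange 0 (PySem.Int.floordiv (lst.length : Int) 2) 1).foldl (swapStep c) (some lst)

def dance (lst : List (List String)) (parameter : String) : Option (List (List String)) :=
  if parameter == "men" then
    let length : Int := lst.length
    if PySem.Int.mod length 2 == 0 then swapLoop lst 1 else swapLoop lst 1
  else if parameter == "women" then
    let length : Int := lst.length
    if PySem.Int.mod length 2 == 0 then swapLoop lst 0 else swapLoop lst 0
  else none

-- ===== PORT B =====
def dance_alt (lst : List (List String)) (parameter : String) : Option (List (List String)) :=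
  (if parameter == "men" then some (1 : Int) else if parameter == "women" then some (0 : Int) else none).bind fun col =>
    (lst.mapM (fun row => PySem.List.pyGet? row col)).bind fun values =>   -- values = [row[col] for row in lst]
      let rev := values.reverse                                            -- values.reverse()
      ((lst.zip rev).mapM (fun rv => PySem.List.pySet? rv.1 col rv.2)).bind fun res =>  -- for row, v in zip(lst, values): row[col] = v
        some res

-- ===== PRECONDITION & SPEC =====
-- Pre_ excludes inputs where some row is too short for the selected column: there A either raises
-- IndexError mid-swap or (when only rows its loop never touches — a lone or odd-middle row — are short)
-- returns with the short row untouched, while B, which reads the whole column first, raises IndexError.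
def Pre_dance (lst : List (List String)) (parameter : String) : Prop :=
  (parameter = "men" → ∀ row ∈ lst, 2 ≤ row.length) ∧
  (parameter = "women" → ∀ row ∈ lst, 1 ≤ row.length)
instance (lst : List (List String)) (parameter : String) : Decidable (Pre_dance lst parameter) := by unfold Pre_dance; infer_instance
def pvWitness_dance : List (List String) × String := ([["a", "b"], ["c", "d"], ["e", "f"]], "men")

def Spec_dance (lst : List (List String)) (parameter : String) (out : Option (List (List String))) : Prop := out = dance_alt lst parameter
instance (lst : List (List String)) (parameter : String) (out : Option (List (List String))) : Decidable (Spec_dance lst parameter out) := by unfold Spec_dance; infer_instance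

-- ===== CLAIM (what is proved, stated in full; the proofs are below) =====
def Claim_equal_dance : Prop := ∀ (lst : List (List String)) (parameter : String), Dom_dance lst parameter → Pre_dance lst parameter → Spec_dance lst parameter (dance lst parameter)

-- ===== LEMMAS AND PROOFS =====

-- column value of row m
def colv (lst : List (List String)) (c : Nat) (m : Nat) : String := (lst.getD m []).getD c ""

-- state of A's loop after k steps: first k and last k column entries mirrored
def part (lst : List (List String)) (c k : Nat) : List (List String) :=
  (List.range lst.length).map (fun j =>
    (lst.getD j []).set c (colv lst c (if j < k ∨ lst.length - k ≤ j then lst.length - 1 - j else j)))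

lemma set_own (row : List String) (c : Nat) (hc : c < row.length) : row.set c (row.getD c "") = row := by
  have : row.getD c "" = row[c] := by
    simp [List.getD, List.getElem?_eq_getElem hc]
  rw [this, List.set_getElem_self]

lemma part_zero (lst : List (List String)) (c : Nat) (hc : ∀ row ∈ lst, c < row.length) :
    part lst c 0 = lst := by
  apply List.ext_getElem
  · simp [part]
  · intro j h1 h2
    simp only [part, List.getElem_map, List.getElem_range]
    have hj : j < lst.length := by simpa [part] using h2
    rw [if_neg (by omega : ¬(j < 0 ∨ lst.length - 0 ≤ j))]
    have hget : lst.getD j [] = lst[j] := by simp [List.getD, List.getElem?_eq_getElem hj]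
    have hcv : colv lst c j = lst[j].getD c "" := by
      simp [colv, List.getD, List.getElem?_eq_getElem hj]
    rw [hget, hcv]
    exact set_own _ _ (hc _ (List.getElem_mem hj))

lemma length_part (lst : List (List String)) (c k : Nat) : (part lst c k).length = lst.length := by
  simp [part]

lemma getElem_part (lst : List (List String)) (c k j : Nat) (hj : j < lst.length) :
    (part lst c k)[j]'(by simp [length_part, hj]) =
      lst[j].set c (colv lst c (if j < k ∨ lst.length - k ≤ j then lst.length - 1 - j else j)) := by
  simp only [part, List.getElem_map, List.getElem_range]
  congr 1
  simp [List.getD, List.getElem?_eq_getElem hj]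

lemma loop_inv (lst : List (List String)) (c k : Nat)
    (hc : ∀ row ∈ lst, c < row.length) (hk : k ≤ lst.length / 2) :
    (PySem.List.pyRange 0 (k : Int) 1).foldl (swapStep (c : Int)) (some lst) = some (part lst c k) := by
  induction k with
  | zero =>
    rw [PySem.List.pyRange_one_eq_nil (by omega)]
    simp [part_zero lst c hc]
  | succ k ih =>
    have hk' : k ≤ lst.length / 2 := by omega
    have hklt : k < lst.length / 2 := by omega
    rw [show ((k + 1 : Nat) : Int) = (k : Int) + 1 by push_cast; ring,
        PySem.List.pyRange_one_succ_right (by omega), List.foldl_append, ih hk']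
    -- now one swapStep on (part lst c k) at index k
    set n := lst.length with hn_def
    have h2k : 2 * k + 1 < n := by omega
    have hkn : k < n := by omega
    have hjn : n - 1 - k < n := by omega
    have hkj : k < n - 1 - k := by omega
    have hlen : (part lst c k).length = n := length_part lst c k
    -- the rows at k and n-1-k are still the original rows
    have hrowk : (part lst c k)[k]'(by omega) = lst[k] := by
      rw [getElem_part lst c k k hkn]
      rw [if_neg (by omega : ¬(k < k ∨ n - k ≤ k))]
      have : colv lst c k = lst[k].getD c "" := by
        simp [colv, List.getD, List.getElem?_eq_getElem hkn]
      rw [this]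
      exact set_own _ _ (hc _ (List.getElem_mem hkn))
    have hrowj : (part lst c k)[n - 1 - k]'(by omega) = lst[n - 1 - k] := by
      rw [getElem_part lst c k (n - 1 - k) hjn]
      rw [if_neg (by omega : ¬(n - 1 - k < k ∨ n - k ≤ n - 1 - k))]
      have : colv lst c (n - 1 - k) = lst[n - 1 - k].getD c "" := by
        simp [colv, List.getD, List.getElem?_eq_getElem hjn]
      rw [this]
      exact set_own _ _ (hc _ (List.getElem_mem hjn))
    have hck : c < lst[k].length := hc _ (List.getElem_mem hkn)
    have hcj : c < lst[n - 1 - k].length := hc _ (List.getElem_mem hjn)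
    -- unfold the step
    simp only [List.foldl_cons, List.foldl_nil, swapStep, Option.bind_some]
    -- negative index: pyGet? l (-(k+1)) = l[n-(k+1)]?
    have hneg : PySem.List.pyGet? (part lst c k) (-((k : Int) + 1)) = some (lst[n - 1 - k]) := by
      rw [show (-((k : Int) + 1)) = -(((k + 1 : Nat) : Int)) by push_cast; ring,
          PySem.List.pyGet?_neg_natCast (part lst c k) (k + 1) (by omega) (by omega)]
      rw [hlen, show n - (k + 1) = n - 1 - k by omega]
      rw [List.getElem?_eq_getElem (by omega), hrowj]
    have hposk : PySem.List.pyGet? (part lst c k) (k : Int) = some (lst[k]) := by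
      rw [PySem.List.pyGet?_natCast, List.getElem?_eq_getElem (by omega), hrowk]
    rw [hneg]
    simp only [Option.bind_eq_bind, Option.bind_some]
    have hga : PySem.List.pyGet? (lst[n - 1 - k]) (c : Int) = some (lst[n - 1 - k][c]) := by
      rw [PySem.List.pyGet?_natCast, List.getElem?_eq_getElem hcj]
    rw [hga]
    simp only [Option.bind_some]
    rw [hposk]
    simp only [Option.bind_some]
    have hgb : PySem.List.pyGet? (lst[k]) (c : Int) = some (lst[k][c]) := by
      rw [PySem.List.pyGet?_natCast, List.getElem?_eq_getElem hck]
    rw [hgb]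
    simp only [Option.bind_some]
    rw [PySem.List.pySet?_natCast (lst[k]) c _ (by omega : c < lst[k].length)]
    simp only [Option.bind_some]
    rw [PySem.List.pySet?_natCast (part lst c k) k _ (by omega : k < (part lst c k).length)]
    simp only [Option.bind_some]
    -- l1 = (part k).set k (lst[k].set c a)
    set l1 := (part lst c k).set k (lst[k].set c (lst[n - 1 - k][c])) with hl1
    have hl1len : l1.length = n := by simp [hl1, hlen]
    have hneg2 : PySem.List.pyGet? l1 (-((k : Int) + 1)) = some (lst[n - 1 - k]) := by
      rw [show (-((k : Int) + 1)) = -(((k + 1 : Nat) : Int)) by push_cast; ring,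
          PySem.List.pyGet?_neg_natCast l1 (k + 1) (by omega) (by omega)]
      rw [hl1len, show n - (k + 1) = n - 1 - k by omega]
      rw [List.getElem?_eq_getElem (by omega)]
      congr 1
      simp only [hl1, List.getElem_set]
      rw [if_neg (by omega)]
      exact hrowj
    rw [hneg2]
    simp only [Option.bind_some]
    rw [PySem.List.pySet?_natCast (lst[n - 1 - k]) c _ (by omega : c < lst[n - 1 - k].length)]
    simp only [Option.bind_some]
    -- the final write goes through the negative index n-1-k = -(k+1)
    have hsetneg : PySem.List.pySet? l1 (-((k : Int) + 1)) (lst[n - 1 - k].set c (lst[k][c])) =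
        some (l1.set (n - 1 - k) (lst[n - 1 - k].set c (lst[k][c]))) := by
      unfold PySem.List.pySet? PySem.List.pyIdx?
      rw [hl1len, if_neg (by omega), if_pos (by omega)]
      rw [show (-(-((k : Int) + 1))).toNat = k + 1 by omega,
          show n - (k + 1) = n - 1 - k by omega]
      rfl
    rw [hsetneg]
    congr 1
    -- final list equality
    apply List.ext_getElem
    · simp [hl1, hlen, length_part]
      try omega
    · intro j h1 h2
      have hjlt : j < n := by simpa [hl1, hlen] using h1
      rw [getElem_part lst c (k + 1) j hjlt]
      simp only [hl1, List.getElem_set]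
      by_cases hj1 : n - 1 - k = j
      · subst hj1
        rw [if_pos rfl]
        rw [if_pos (by omega : n - 1 - k < k + 1 ∨ n - (k + 1) ≤ n - 1 - k),
            show n - 1 - (n - 1 - k) = k by omega]
        have : colv lst c k = lst[k][c] := by
          simp [colv, List.getD, List.getElem?_eq_getElem hkn, List.getElem?_eq_getElem hck]
        rw [this]
      · rw [if_neg hj1]
        by_cases hj2 : k = j
        · subst hj2
          rw [if_pos rfl]
          rw [if_pos (by omega : k < k + 1 ∨ n - (k + 1) ≤ k)]
          have : colv lst c (n - 1 - k) = lst[n - 1 - k][c] := by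
            simp [colv, List.getD, List.getElem?_eq_getElem hjn, List.getElem?_eq_getElem hcj]
          rw [this]
        · rw [if_neg hj2]
          rw [getElem_part lst c k j hjlt]
          have : (if j < k + 1 ∨ n - (k + 1) ≤ j then n - 1 - j else j)
              = (if j < k ∨ n - k ≤ j then n - 1 - j else j) := by
            split_ifs <;> omega
          rw [this]

-- B's reads succeed and give the column
lemma mapM_reads (lst : List (List String)) (c : Nat) (hc : ∀ row ∈ lst, c < row.length) :
    lst.mapM (fun row => PySem.List.pyGet? row (c : Int)) = some (lst.map (fun r => r.getD c "")) := by
  induction lst with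
  | nil => simp
  | cons x xs ih =>
    have hx : c < x.length := hc _ (List.mem_cons_self)
    have : PySem.List.pyGet? x (c : Int) = some (x.getD c "") := by
      rw [PySem.List.pyGet?_natCast, List.getElem?_eq_getElem hx]
      simp [List.getD, List.getElem?_eq_getElem hx]
    rw [List.mapM_cons, this, ih (fun r hr => hc _ (List.mem_cons_of_mem _ hr))]
    rfl

-- B's writes succeed and set the column
lemma mapM_writes (lst : List (List String)) (vals : List String) (c : Nat)
    (hc : ∀ row ∈ lst, c < row.length) :
    (lst.zip vals).mapM (fun rv => PySem.List.pySet? rv.1 (c : Int) rv.2) =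
      some ((lst.zip vals).map (fun rv => rv.1.set c rv.2)) := by
  induction lst generalizing vals with
  | nil => simp
  | cons x xs ih =>
    cases vals with
    | nil => simp
    | cons v vs =>
      have hx : c < x.length := hc _ (List.mem_cons_self)
      simp only [List.zip_cons_cons, List.mapM_cons,
        PySem.List.pySet?_natCast x c v hx,
        ih vs (fun r hr => hc _ (List.mem_cons_of_mem _ hr))]
      rfl

-- both sides compute part lst c (n/2)
lemma alt_result (lst : List (List String)) (c : Nat) :
    (lst.zip ((lst.map (fun r => r.getD c "")).reverse)).map (fun rv => rv.1.set c rv.2) =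
      part lst c (lst.length / 2) := by
  apply List.ext_getElem
  · simp [part]
  · intro j h1 h2
    have hj : j < lst.length := by simpa [part] using h2
    have hzlen : (lst.zip ((lst.map (fun r => r.getD c "")).reverse)).length = lst.length := by
      simp
    rw [List.getElem_map, List.getElem_zip]
    rw [getElem_part lst c (lst.length / 2) j hj]
    have hτ : (if j < lst.length / 2 ∨ lst.length - lst.length / 2 ≤ j
          then lst.length - 1 - j else j) = lst.length - 1 - j := by
      split_ifs <;> omega
    rw [hτ]
    have hrev : ((lst.map (fun r => r.getD c "")).reverse)[j]'(by simpa using hj) =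
        colv lst c (lst.length - 1 - j) := by
      rw [List.getElem_reverse]
      simp only [List.getElem_map, List.length_map]
      simp [colv, List.getD, List.getElem?_eq_getElem (show lst.length - 1 - j < lst.length by omega)]
    rw [hrev]

lemma main_case (lst : List (List String)) (c : Nat) (hc : ∀ row ∈ lst, c + 1 ≤ row.length) :
    swapLoop lst (c : Int) = some (part lst c (lst.length / 2)) := by
  unfold swapLoop
  have hc' : ∀ row ∈ lst, c < row.length := fun r hr => by have := hc r hr; omega
  have : PySem.Int.floordiv ((lst.length : Int)) 2 = ((lst.length / 2 : Nat) : Int) := by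
    exact_mod_cast PySem.Int.floordiv_natCast lst.length 2
  rw [this]
  exact loop_inv lst c (lst.length / 2) hc' (le_refl _)

-- ===== VERDICT (by name: the statement is the Claim_ definition above) =====
theorem dance_spec : Claim_equal_dance := by
  intro lst parameter _ hpre
  unfold Spec_dance dance dance_alt
  by_cases hm : parameter = "men"
  · subst hm
    have hc := hpre.1 rfl
    have hc' : ∀ row ∈ lst, (1 : Nat) < row.length := fun r hr => by have := hc r hr; omega
    simp only [beq_self_eq_true, if_pos, ite_self]
    rw [show (1 : Int) = ((1 : Nat) : Int) by norm_num,
        main_case lst 1 (fun r hr => by have := hc r hr; omega),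
        Option.bind_some, mapM_reads lst 1 hc', Option.bind_some]
    rw [mapM_writes lst _ 1 hc', Option.bind_some, alt_result lst 1]
  · by_cases hw : parameter = "women"
    · subst hw
      have hc := hpre.2 rfl
      have hc' : ∀ row ∈ lst, (0 : Nat) < row.length := fun r hr => by have := hc r hr; omega
      have hne : ("women" == "men") = false := by decide
      simp only [hne, Bool.false_eq_true, if_false, beq_self_eq_true, if_pos, ite_self]
      rw [show (0 : Int) = ((0 : Nat) : Int) by norm_num,
          main_case lst 0 (fun r hr => by have := hc r hr; omega),
          Option.bind_some, mapM_reads lst 0 hc', Option.bind_some]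
      rw [mapM_writes lst _ 0 hc', Option.bind_some, alt_result lst 0]
    · have h1 : (parameter == "men") = false := by simpa using hm
      have h2 : (parameter == "women") = false := by simpa using hw
      simp [h1, h2]
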